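-- pv_equiv track=rewrite | github.com/MihailBot/tg_bot_tasks | few_tasks_handler.py | sort_few_tasks
-- ===== SOURCE A (Python) =====
-- def sort_few_tasks(user_tasks):
--
--     spis_few_buttons = []
--     letters = []
--
--     inp_list = list(user_tasks)
--     ready_word = ''
--     while ',' in inp_list:
--         pop = ''
--         while pop != ',':
--             pop = inp_list.pop()
--             letters.append(pop)
--
--         letters.pop()
--         letters.reverse()
--
--         if letters[0] == ' ':
--             letters.pop(0)
--
--         ready_word = ''.join(letters)
--         spis_few_buttons.append(ready_word)
--         letters.clear()
--
--     for i in range(len(inp_list)):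
--         pop = inp_list.pop()
--         letters.append(pop)
--
--     letters.reverse()
--     ready_word = ''.join(letters)
--     spis_few_buttons.append(ready_word)
--     letters.clear()
--     spis_few_buttons.reverse()
--     return spis_few_buttons
-- ===== SOURCE B (Python) =====
-- def sort_few_tasks(user_tasks):
--     parts = user_tasks.split(',')
--     return [parts[0]] + [p[1:] if p[0] == ' ' else p for p in parts[1:]]
-- ===== Notes on version B (the rewrite author's own statement) =====
-- stated objective: faster
-- what changed: Replaced the nested while-loops that pop characters one at a time off the end of the list (rescanning the whole list for ',' before every word, reversing and re-joining per word) by one split(',') plus a comprehension that strips one leading space from each non-first part; B raises IndexError on exactly the same inputs as A (an empty non-first segment), which Pre_ excludes.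
-- outside the precondition, e.g. on sort_few_tasks(','): A raises IndexError, B raises IndexError
import Mathlib
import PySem

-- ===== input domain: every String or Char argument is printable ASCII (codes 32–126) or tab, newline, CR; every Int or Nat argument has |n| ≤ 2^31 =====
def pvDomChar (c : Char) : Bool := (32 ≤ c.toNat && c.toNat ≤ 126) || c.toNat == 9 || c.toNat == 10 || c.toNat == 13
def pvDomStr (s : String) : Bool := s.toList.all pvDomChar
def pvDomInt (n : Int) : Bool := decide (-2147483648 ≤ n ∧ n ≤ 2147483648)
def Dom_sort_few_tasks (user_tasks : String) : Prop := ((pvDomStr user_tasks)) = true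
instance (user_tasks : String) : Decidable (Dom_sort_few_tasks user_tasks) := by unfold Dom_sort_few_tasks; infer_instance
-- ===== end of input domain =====

-- B replaces A's nested pop-one-char-at-a-time loops by one split(',') plus a map (faster: A rescans for ',' per word).

-- ===== PORT A =====
-- inner `while pop != ','` loop: pop() takes the LAST element (getLast/dropLast).
-- The inp = [] case is pop-from-an-empty-list; it is unreachable on every input
-- (the loop only runs under the `',' in inp_list` guard), so the value there is arbitrary.
def sfInner (inp letters : List Char) : List Char × List Char :=
  if hne : inp = [] then ([], letters)
  else
    let c := inp.getLast hne          -- pop = inp_list.pop()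
    let inp' := inp.dropLast
    let letters' := letters ++ [c]    -- letters.append(pop)
    if c = ',' then (inp', letters') else sfInner inp' letters'
termination_by inp.length
decreasing_by
  have : 0 < inp.length := List.length_pos_iff.mpr hne
  simp; omega

-- needed by sfOuter's termination proof, so it stays above the port
theorem sfInner_shrinks : ∀ (inp letters : List Char), inp ≠ [] →
    (sfInner inp letters).1.length < inp.length := by
  intro inp
  induction inp using List.reverseRecOn with
  | nil => intro letters h; exact absurd rfl h
  | append_singleton r c ih =>
    intro letters _
    rw [sfInner, dif_neg (by simp : ¬(r ++ [c] = []))]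
    simp only [List.getLast_concat, List.dropLast_concat]
    by_cases hc : c = ','
    · rw [if_pos hc]; simp
    · rw [if_neg hc]
      rcases List.eq_nil_or_concat r with hr | ⟨r', c', hr⟩
      · subst hr; rw [sfInner]; simp
      · have := ih (letters ++ [c]) (by simp [hr])
        simp only [List.length_append, List.length_cons]; omega

-- outer `while ',' in inp_list` loop; the `[]` branch is Python's `letters[0]`
-- IndexError (an empty non-first segment), excluded by Pre_.
def sfOuter (inp : List Char) (acc : List String) : List String :=
  if hmem : ',' ∈ inp then
    let p := sfInner inp []
    let letters1 := p.2.dropLast.reverse          -- letters.pop(); letters.reverse()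
    match letters1 with
    | [] => []                                    -- letters[0] : IndexError
    | c :: rest =>
      let word := if c = ' ' then rest else c :: rest   -- if letters[0] == ' ': letters.pop(0)
      sfOuter p.1 (acc ++ [String.ofList word])   -- spis_few_buttons.append(''.join(letters))
  else
    -- the final for-loop pops every char (building inp.reverse), then reverses and joins
    let letters := inp.reverse
    acc ++ [String.ofList letters.reverse]
termination_by inp.length
decreasing_by exact sfInner_shrinks inp [] (List.ne_nil_of_mem hmem)

def sort_few_tasks (user_tasks : String) : List String :=
  (sfOuter user_tasks.toList []).reverse          -- spis_few_buttons.reverse(); return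

-- ===== PORT B =====
-- `p[1:] if p[0] == ' ' else p`; the [] case is Python's IndexError at p[0] (unreachable
-- under Pre_). Exact on every non-empty p: p[0] is the head, p[1:] the tail.
def sfStrip (p : List Char) : String :=
  match p with
  | [] => ""
  | c :: cs => if c = ' ' then String.ofList cs else String.ofList (c :: cs)

-- user_tasks.split(',') ported as List.splitOn on the characters (exact for a 1-char separator)
def sfB (chars : List Char) : List String :=
  match chars.splitOn ',' with
  | [] => []                                        -- unreachable: splitOn never returns []
  | p0 :: rest => String.ofList p0 :: rest.map sfStrip  -- [parts[0]] + [... for p in parts[1:]]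

def sort_few_tasks_alt (user_tasks : String) : List String :=
  sfB user_tasks.toList

-- ===== PRECONDITION & SPEC =====
-- Pre_ excludes exactly the inputs where Python A raises IndexError (some non-first
-- comma-separated segment is empty); Python B raises IndexError there too.
def Pre_sort_few_tasks (user_tasks : String) : Prop :=
  ∀ p ∈ (user_tasks.toList.splitOn ',').tail, p ≠ []
instance (user_tasks : String) : Decidable (Pre_sort_few_tasks user_tasks) := by
  unfold Pre_sort_few_tasks; infer_instance

def pvWitness_sort_few_tasks : String := "a, bc,d"

def Spec_sort_few_tasks (user_tasks : String) (out : List String) : Prop := out = sort_few_tasks_alt user_tasks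
instance (user_tasks : String) (out : List String) : Decidable (Spec_sort_few_tasks user_tasks out) := by unfold Spec_sort_few_tasks; infer_instance

-- ===== CLAIM (what is proved, stated in full; the proofs are below) =====
def Claim_equal_sort_few_tasks : Prop := ∀ (user_tasks : String), Dom_sort_few_tasks user_tasks → Pre_sort_few_tasks user_tasks → Spec_sort_few_tasks user_tasks (sort_few_tasks user_tasks)

-- ===== LEMMAS AND PROOFS =====

-- the inner loop pops exactly the (comma-free) last segment r, plus the ',' itself
theorem sfInner_spec (r : List Char) (hr : ',' ∉ r) :
    ∀ l letters, sfInner (l ++ ',' :: r) letters = (l, letters ++ r.reverse ++ [',']) := by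
  induction r using List.reverseRecOn with
  | nil =>
    intro l letters
    rw [sfInner, dif_neg (by simp : ¬(l ++ [','] = []))]
    simp
  | append_singleton r' c ih =>
    intro l letters
    have hc : ¬(c = ',') := fun h => hr (by simp [h])
    have hr' : ',' ∉ r' := fun h => hr (by simp [h])
    have hsplit : l ++ ',' :: (r' ++ [c]) = (l ++ ',' :: r') ++ [c] := by simp
    rw [hsplit, sfInner, dif_neg (by simp : ¬((l ++ ',' :: r') ++ [c] = []))]
    simp only [List.getLast_concat, List.dropLast_concat]
    rw [if_neg hc, ih hr' l (letters ++ [c])]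
    simp

theorem splitOn_last_comma (l r : List Char) (hr : ',' ∉ r) :
    (l ++ ',' :: r).splitOn ',' = l.splitOn ',' ++ [r] := by
  unfold List.splitOn
  rw [List.splitOnP_append_cons _ l r ',' (by simp)]
  have hsingle : List.splitOnP (· == ',') r = [r] :=
    List.splitOnP_eq_single _ _ (by intro x hx; simp; intro h; exact hr (h ▸ hx))
  rw [hsingle]

theorem sfB_last_comma (l r : List Char) (hr : ',' ∉ r) :
    sfB (l ++ ',' :: r) = sfB l ++ [sfStrip r] := by
  unfold sfB
  rw [splitOn_last_comma l r hr]
  obtain ⟨p0, rest, hp⟩ := List.exists_cons_of_ne_nil (List.splitOnP_ne_nil (· == ',') l)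
  rw [List.splitOn] at *
  rw [hp]
  simp

theorem tail_splitOn_last_comma (l r : List Char) (hr : ',' ∉ r) :
    ((l ++ ',' :: r).splitOn ',').tail = (l.splitOn ',').tail ++ [r] := by
  rw [splitOn_last_comma l r hr]
  obtain ⟨p0, rest, hp⟩ := List.exists_cons_of_ne_nil (List.splitOnP_ne_nil (· == ',') l)
  rw [List.splitOn] at *
  rw [hp]
  simp

-- every list containing ',' splits at its LAST comma
theorem exists_last_comma_split : ∀ (inp : List Char), ',' ∈ inp →
    ∃ l r, inp = l ++ ',' :: r ∧ ',' ∉ r := by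
  intro inp
  induction inp using List.reverseRecOn with
  | nil => intro h; simp at h
  | append_singleton r' c ih =>
    intro h
    by_cases hc : c = ','
    · exact ⟨r', [], by simp [hc], by simp⟩
    · have hm : ',' ∈ r' := by
        rcases List.mem_append.mp h with h1 | h1
        · exact h1
        · simp at h1; exact absurd h1.symm hc
      obtain ⟨l, r, hsp, hnc⟩ := ih hm
      exact ⟨l, r ++ [c], by simp [hsp], by
        intro hx
        rcases List.mem_append.mp hx with h1 | h1
        · exact hnc h1
        · simp at h1; exact hc h1.symm⟩

-- the outer loop: under Pre_, A's accumulator ends up as acc ++ reverse of B's list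
theorem sfOuter_spec : ∀ (n : ℕ) (inp : List Char) (acc : List String), inp.length ≤ n →
    (∀ p ∈ (inp.splitOn ',').tail, p ≠ []) →
    sfOuter inp acc = acc ++ (sfB inp).reverse := by
  intro n
  induction n with
  | zero =>
    intro inp acc hlen _
    have : inp = [] := List.eq_nil_of_length_eq_zero (Nat.le_zero.mp hlen)
    subst this
    rw [sfOuter]
    simp [sfB, List.splitOn]
  | succ n ih =>
    intro inp acc hlen hpre
    by_cases hmem : ',' ∈ inp
    · -- decompose at the LAST comma: inp = l ++ ',' :: r with ',' ∉ r
      obtain ⟨l, r, hinp, hrnc⟩ := exists_last_comma_split inp hmem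
      -- the precondition gives r ≠ [] and carries over to l
      have hrne : r ≠ [] := by
        apply hpre
        rw [hinp, tail_splitOn_last_comma l r hrnc]
        simp
      have hprel : ∀ p ∈ (l.splitOn ',').tail, p ≠ [] := by
        intro p hp
        apply hpre
        rw [hinp, tail_splitOn_last_comma l r hrnc]
        simp [hp]
      have hlenl : l.length ≤ n := by
        have := congrArg List.length hinp
        simp at this
        omega
      -- evaluate one outer iteration
      obtain ⟨c, rest, hr⟩ := List.exists_cons_of_ne_nil hrne
      rw [sfOuter, dif_pos hmem]
      simp only []
      rw [show sfInner inp [] = (l, [] ++ r.reverse ++ [',']) from hinp ▸ sfInner_spec r hrnc l []]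
      simp only [List.nil_append, List.dropLast_concat, List.reverse_reverse]
      rw [hr]
      simp only []
      rw [ih l (acc ++ [String.ofList (if c = ' ' then rest else c :: rest)]) hlenl hprel]
      have hword : String.ofList (if c = ' ' then rest else c :: rest) = sfStrip r := by
        rw [hr]; unfold sfStrip
        by_cases h : c = ' ' <;> simp [h]
      rw [hword, hinp, sfB_last_comma l r hrnc]
      simp
    · -- no comma left: the final for-loop appends the whole remainder verbatim
      rw [sfOuter, dif_neg hmem]
      have : inp.splitOn ',' = [inp] := by
        unfold List.splitOn
        exact List.splitOnP_eq_single _ _ (by intro x hx; simp; intro h; exact hmem (h ▸ hx))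
      simp [sfB, this]

-- ===== VERDICT (by name: the statement is the Claim_ definition above) =====
theorem sort_few_tasks_spec : Claim_equal_sort_few_tasks := by
  intro u _ hpre
  unfold Spec_sort_few_tasks sort_few_tasks sort_few_tasks_alt
  rw [sfOuter_spec u.toList.length u.toList [] le_rfl hpre]
  simp
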